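-- pv_equiv track=rewrite | github.com/faizack619/DSA-Python | DSA/basic/Function/func_Chall/Coversion.py | b2O
-- ===== SOURCE A (Python) =====
-- def b2O(n):
--     ans,y,x=0,0,1
--     while n>0 :
--         y=n%10
--         ans=ans+x*y
--         x=x*8
--         n=n//10
--     return ans
-- ===== SOURCE B (Python) =====
-- def b2O(n):
--     if n <= 0:
--         return 0
--     return b2O(n // 10) * 8 + n % 10
-- ===== Notes on version B (the rewrite author's own statement) =====
-- stated objective: simpler
-- what changed: Replaced the iterative loop that maintains a running answer and a power-of-eight accumulator with a two-line stateless recursion doing Horner evaluation of the decimal digits in the octal base.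
import Mathlib
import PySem

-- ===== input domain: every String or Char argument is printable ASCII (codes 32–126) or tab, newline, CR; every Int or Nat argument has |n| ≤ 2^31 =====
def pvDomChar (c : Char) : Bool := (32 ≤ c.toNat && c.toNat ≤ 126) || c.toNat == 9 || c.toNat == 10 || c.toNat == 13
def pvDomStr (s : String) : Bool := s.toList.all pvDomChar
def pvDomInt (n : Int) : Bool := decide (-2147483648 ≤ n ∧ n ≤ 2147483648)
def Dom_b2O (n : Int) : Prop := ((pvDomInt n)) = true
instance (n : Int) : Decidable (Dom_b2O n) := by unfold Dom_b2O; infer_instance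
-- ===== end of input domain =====

-- B replaces A's loop with (ans, power-of-8) state by a stateless recursive Horner evaluation; objective: simpler.


-- ===== PORT A =====
-- A's while loop, state (ans, y, x, n) exactly as in the Python
def b2OLoop (ans y x n : Int) : Int :=
  if h : n > 0 then
    b2OLoop (ans + x * (PySem.Int.mod n 10)) (PySem.Int.mod n 10) (x * 8)
      (PySem.Int.floordiv n 10)
  else ans
termination_by n.toNat
decreasing_by
  rw [PySem.Int.floordiv_eq_ediv_of_pos (by omega : (0:Int) < 10)]
  omega

def b2O (n : Int) : Int := b2OLoop 0 0 1 n

-- ===== PORT B =====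
def b2O_alt (n : Int) : Int :=
  if n ≤ 0 then 0
  else b2O_alt (PySem.Int.floordiv n 10) * 8 + PySem.Int.mod n 10
termination_by n.toNat
decreasing_by
  rw [PySem.Int.floordiv_eq_ediv_of_pos (by omega : (0:Int) < 10)]
  omega

-- ===== PRECONDITION & SPEC =====
def Spec_b2O (n : Int) (out : Int) : Prop := out = b2O_alt n
instance (n : Int) (out : Int) : Decidable (Spec_b2O n out) := by unfold Spec_b2O; infer_instance

-- ===== CLAIM (what is proved, stated in full; the proofs are below) =====
def Claim_equal_b2O : Prop := ∀ (n : Int), Dom_b2O n → Spec_b2O n (b2O n)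

-- ===== LEMMAS AND PROOFS =====
-- Loop invariant: the loop returns ans + x * (Horner value of n's digits in base 8)
theorem b2OLoop_eq (n : Int) : ∀ (ans y x : Int), b2OLoop ans y x n = ans + x * b2O_alt n := by
  induction n using b2O_alt.induct with
  | case1 n hn =>
    intro ans y x
    rw [b2OLoop, b2O_alt]
    simp [hn]
  | case2 n hn ih =>
    intro ans y x
    rw [b2OLoop, b2O_alt]
    simp only [hn, if_false, dif_pos (by omega : n > 0)]
    rw [ih]
    ring

-- ===== VERDICT (by name: the statement is the Claim_ definition above) =====
theorem b2O_spec : Claim_equal_b2O := by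
  intro n _
  unfold Spec_b2O b2O
  rw [b2OLoop_eq]
  ring
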